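-- pv_equiv track=rewrite | github.com/JIWON27/CodingTest | 프로그래머스/unrated/140108. 문자열 나누기/문자열 나누기.py | solution
-- ===== SOURCE A (Python) =====
-- from collections import deque
--
-- def solution(string):
--     answer = 0
--     s = deque(string)
--     while len(s) != 0:
--         x = s.popleft()
--         if len(s) == 0: # 뒤에 더 이상 읽을 문자가 없는 경우
--             return answer + 1
--         cnt_x = 1
--         cnt_other = 0
--         for other in s:
--             if x == other:
--                 cnt_x += 1
--             else:
--                 cnt_other += 1
--             if cnt_x == cnt_other:
--                 for _ in range(cnt_x*2-1):
--                     s.popleft()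
--                 answer += 1
--                 break
--         if cnt_x != cnt_other:
--             answer += 1
--             for _ in range(cnt_x + cnt_other - 1):
--                 s.popleft()
--     return answer
-- ===== SOURCE B (Python) =====
-- def solution(string):
--     answer = 0
--     cnt_x = 0
--     cnt_other = 0
--     x = ''
--     for ch in string:
--         if cnt_x == cnt_other:
--             x = ch
--         if ch == x:
--             cnt_x += 1
--         else:
--             cnt_other += 1
--         if cnt_x == cnt_other:
--             answer += 1
--             cnt_x = 0
--             cnt_other = 0
--     if cnt_x != cnt_other:
--         answer += 1
--     return answer
-- ===== Notes on version B (the rewrite author's own statement) =====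
-- stated objective: simpler
-- what changed: Replaced the deque with repeated popleft loops and an inner rescan per segment by a single linear pass keeping three state variables (segment first char, two counters) with a trailing-segment fixup.
import Mathlib
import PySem

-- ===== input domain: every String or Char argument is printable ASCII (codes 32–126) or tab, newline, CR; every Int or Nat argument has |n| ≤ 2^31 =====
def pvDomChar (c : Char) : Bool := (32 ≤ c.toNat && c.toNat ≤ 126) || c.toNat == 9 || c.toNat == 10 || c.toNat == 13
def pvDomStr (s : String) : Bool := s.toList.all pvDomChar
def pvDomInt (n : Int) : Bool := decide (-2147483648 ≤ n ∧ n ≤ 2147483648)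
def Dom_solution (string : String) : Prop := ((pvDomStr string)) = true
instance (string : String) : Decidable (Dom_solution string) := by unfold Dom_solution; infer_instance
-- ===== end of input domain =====

-- B replaces A's deque with nested consume-and-rescan loops by one linear pass with three
-- state variables (simpler decomposition); equal return values proved for every string.

-- ===== PORT A =====
-- inner `for other in s` loop of A: updates (cnt_x, cnt_other) and stops (Python's
-- `break`) at the first position where they become equal, returning the final counters.
def scanA (x : Char) (s : List Char) (cx co : Nat) : Nat × Nat :=
  match s with
  | [] => (cx, co)
  | c :: t =>
    let cx' := if x = c then cx + 1 else cx
    let co' := if x = c then co else co + 1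
    if cx' = co' then (cx', co') else scanA x t cx' co'

def loopA (s : List Char) (answer : Int) : Int :=
  match s with
  | [] => answer
  | x :: rest =>
    if rest = [] then answer + 1
    else
      let p := scanA x rest 1 0
      if p.1 = p.2 then
        loopA (rest.drop (2 * p.1 - 1)) (answer + 1)
      else
        loopA (rest.drop (p.1 + p.2 - 1)) (answer + 1)
termination_by s.length
decreasing_by
  all_goals (simp [List.length_drop]; try omega)


def solution (string : String) : Int := loopA string.toList 0

-- ===== PORT B =====
-- B's single for-loop: state (x, cnt_x, cnt_other, answer); after the loop the trailing
-- unbalanced segment adds 1.  (Python's initial x = '' is never compared before being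
-- reassigned, so any initial character works; ' ' is used.)
def loopB (l : List Char) (x : Char) (cx co : Nat) (answer : Int) : Int :=
  match l with
  | [] => if cx ≠ co then answer + 1 else answer
  | c :: t =>
    let x' := if cx = co then c else x
    let cx' := if c = x' then cx + 1 else cx
    let co' := if c = x' then co else co + 1
    if cx' = co' then loopB t x' 0 0 (answer + 1)
    else loopB t x' cx' co' answer


def solution_alt (string : String) : Int := loopB string.toList ' ' 0 0 0

-- ===== PRECONDITION & SPEC =====
def Spec_solution (string : String) (out : Int) : Prop := out = solution_alt string
instance (string : String) (out : Int) : Decidable (Spec_solution string out) := by unfold Spec_solution; infer_instance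

-- ===== CLAIM (what is proved, stated in full; the proofs are below) =====
def Claim_equal_solution : Prop := ∀ (string : String), Dom_solution string → Spec_solution string (solution string)

-- ===== LEMMAS AND PROOFS =====
lemma scanA_sum_le (x : Char) (s : List Char) (cx co : Nat) :
    cx + co ≤ (scanA x s cx co).1 + (scanA x s cx co).2 := by
  induction s generalizing cx co with
  | nil => simp [scanA]
  | cons c t ih =>
    simp only [scanA]
    split_ifs with h1 h2 h3
    · simp
    · exact le_trans (by omega) (ih (cx+1) co)
    · simp
    · exact le_trans (by omega) (ih cx (co+1))

lemma scanA_exhaust (x : Char) (s : List Char) (cx co : Nat)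
    (h : (scanA x s cx co).1 ≠ (scanA x s cx co).2) :
    (scanA x s cx co).1 + (scanA x s cx co).2 = cx + co + s.length := by
  induction s generalizing cx co with
  | nil => simp [scanA]
  | cons c t ih =>
    simp only [scanA] at h ⊢
    split_ifs at h ⊢ with h1 h2 h3
    · simp_all
    · have := ih (cx+1) co h; simp [this]; omega
    · simp_all
    · have := ih cx (co+1) h; simp [this]; omega

lemma loopB_scan (l : List Char) (x : Char) (cx co : Nat) (ans : Int) (hne : cx ≠ co) :
    loopB l x cx co ans =
      (let p := scanA x l cx co
       if p.1 = p.2 then loopB (l.drop (p.1 + p.2 - cx - co)) x 0 0 (ans + 1)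
       else ans + 1) := by
  induction l generalizing cx co ans with
  | nil => simp [loopB, scanA, hne]
  | cons c t ih =>
    simp only [loopB, scanA, if_neg hne]
    have hx' : (if c = x then cx + 1 else cx) = (if x = c then cx + 1 else cx) := by
      by_cases h : x = c <;> simp [h, Ne.symm]
    have ho' : (if c = x then co else co + 1) = (if x = c then co else co + 1) := by
      by_cases h : x = c <;> simp [h, eq_comm]
    rw [hx', ho']
    set cx' := if x = c then cx + 1 else cx with hcx
    set co' := if x = c then co else co + 1 with hco
    have hsucc : cx' + co' = cx + co + 1 := by
      by_cases h : x = c <;> simp [hcx, hco, h] <;> omega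
    by_cases hb : cx' = co'
    · simp only [if_pos hb]
      have h1 : cx' + co' - cx - co = 1 := by omega
      simp [h1]
    · simp only [if_neg hb]
      rw [ih cx' co' ans hb]
      have hle := scanA_sum_le x t cx' co'
      simp only []
      split
      · congr 1
        have h2 : (scanA x t cx' co').1 + (scanA x t cx' co').2 - cx - co
             = ((scanA x t cx' co').1 + (scanA x t cx' co').2 - cx' - co') + 1 := by omega
        simp [h2]
      · rfl
lemma loopA_eq_loopB_aux (n : Nat) : ∀ (s : List Char), s.length ≤ n → ∀ (ans : Int) (y : Char),
    loopA s ans = loopB s y 0 0 ans := by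
  induction n with
  | zero =>
    intro s hs ans y
    have : s = [] := List.eq_nil_of_length_eq_zero (Nat.le_zero.mp hs)
    simp [this, loopA, loopB]
  | succ n ih =>
    intro s hs ans y
    cases s with
    | nil => simp [loopA, loopB]
    | cons x rest =>
      cases rest with
      | nil => simp [loopA, loopB]
      | cons c t =>
        have hstep : loopB (x :: c :: t) y 0 0 ans = loopB (c :: t) x 1 0 ans := by
          simp [loopB]
        rw [hstep, loopB_scan (c :: t) x 1 0 ans (by omega)]
        simp only [loopA, if_neg (List.cons_ne_nil c t)]
        set p := scanA x (c :: t) 1 0 with hp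
        have hsum := scanA_sum_le x (c :: t) 1 0
        rw [← hp] at hsum
        by_cases hb : p.1 = p.2
        · simp only [if_pos hb]
          have h1 : p.1 + p.2 - 1 - 0 = 2 * p.1 - 1 := by omega
          rw [h1]
          have hlen : ((c :: t).drop (2 * p.1 - 1)).length ≤ n := by
            rw [List.length_drop]
            simp only [List.length_cons] at hs ⊢
            omega
          exact ih _ hlen (ans + 1) x
        · simp only [if_neg hb]
          have hex := scanA_exhaust x (c :: t) 1 0 (by rw [← hp]; exact hb)
          rw [← hp] at hex
          have hnil : (c :: t).drop (p.1 + p.2 - 1) = [] := by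
            apply List.drop_eq_nil_of_le
            simp only [List.length_cons] at hex ⊢; omega
          rw [hnil]
          simp [loopA]

lemma loopA_eq_loopB (s : List Char) (ans : Int) (y : Char) :
    loopA s ans = loopB s y 0 0 ans :=
  loopA_eq_loopB_aux s.length s le_rfl ans y

-- ===== VERDICT (by name: the statement is the Claim_ definition above) =====
theorem solution_spec : Claim_equal_solution := by
  intro string _
  unfold Spec_solution solution solution_alt
  exact loopA_eq_loopB _ _ _
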